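-- pv_equiv track=rewrite | github.com/hipstereclipse/Data-Analysis-Tool | Programming/DataAnalyzer/utils.py | generate_color_sequence
-- ===== SOURCE A (Python) =====
-- def generate_color_sequence(n_colors):
--     """
--     Generate a sequence of distinct colors
--
--     Args:
--         n_colors (int): Number of colors needed
--
--     Returns:
--         list: List of hex color codes
--     """
--     # Base colors to cycle through
--     base_colors = [
--         '#1f77b4',  # Blue
--         '#ff7f0e',  # Orange
--         '#2ca02c',  # Green
--         '#d62728',  # Red
--         '#9467bd',  # Purple
--         '#8c564b',  # Brown
--         '#e377c2',  # Pink
--         '#7f7f7f',  # Gray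
--         '#bcbd22',  # Olive
--         '#17becf'  # Cyan
--     ]
--
--     colors = []
--
--     # Cycle through base colors
--     for i in range(n_colors):
--         colors.append(base_colors[i % len(base_colors)])
--
--     return colors
-- ===== SOURCE B (Python) =====
-- def generate_color_sequence(n_colors):
--     """
--     Generate a sequence of distinct colors
--
--     Args:
--         n_colors (int): Number of colors needed
--
--     Returns:
--         list: List of hex color codes
--     """
--     base_colors = [
--         '#1f77b4',  # Blue
--         '#ff7f0e',  # Orange
--         '#2ca02c',  # Green
--         '#d62728',  # Red
--         '#9467bd',  # Purple
--         '#8c564b',  # Brown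
--         '#e377c2',  # Pink
--         '#7f7f7f',  # Gray
--         '#bcbd22',  # Olive
--         '#17becf'  # Cyan
--     ]
--     if n_colors <= 0:
--         return []
--     reps = n_colors // len(base_colors) + 1
--     return (base_colors * reps)[:n_colors]
-- ===== Notes on version B (the rewrite author's own statement) =====
-- stated objective: simpler
-- what changed: Replaces the per-element loop with modular indexing by bulk palette replication (base_colors * reps) followed by a single slice to n_colors, with an explicit guard for non-positive counts.
import Mathlib
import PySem

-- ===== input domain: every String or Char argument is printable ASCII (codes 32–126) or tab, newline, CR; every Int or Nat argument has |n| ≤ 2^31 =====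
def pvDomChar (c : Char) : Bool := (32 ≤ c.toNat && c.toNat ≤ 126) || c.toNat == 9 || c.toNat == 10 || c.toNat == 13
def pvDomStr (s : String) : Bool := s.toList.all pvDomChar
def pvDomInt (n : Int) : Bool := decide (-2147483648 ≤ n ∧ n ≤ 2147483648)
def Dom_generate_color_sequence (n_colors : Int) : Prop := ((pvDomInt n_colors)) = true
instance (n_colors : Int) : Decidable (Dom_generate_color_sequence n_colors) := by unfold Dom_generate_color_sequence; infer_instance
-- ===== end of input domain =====

-- B replaces A's per-element loop with modular indexing by bulk replication of the
-- palette plus one slice (objective: simpler).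

-- ===== PORT A =====
def pvBaseColors : List String :=
  ["#1f77b4", "#ff7f0e", "#2ca02c", "#d62728", "#9467bd",
   "#8c564b", "#e377c2", "#7f7f7f", "#bcbd22", "#17becf"]

def generate_color_sequence (n_colors : Int) : List String :=
  (PySem.List.pyRange 0 n_colors 1).foldl
    (fun colors i => colors ++ [PySem.List.pyGetD pvBaseColors (PySem.Int.mod i 10) ""]) []

-- ===== PORT B =====
def generate_color_sequence_alt (n_colors : Int) : List String :=
  if n_colors ≤ 0 then []
  else
    let reps := PySem.Int.floordiv n_colors 10 + 1
    PySem.List.slice ((List.replicate reps.toNat pvBaseColors).flatten) none (some n_colors)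

-- ===== PRECONDITION & SPEC =====
def Spec_generate_color_sequence (n_colors : Int) (out : List String) : Prop := out = generate_color_sequence_alt n_colors
instance (n_colors : Int) (out : List String) : Decidable (Spec_generate_color_sequence n_colors out) := by unfold Spec_generate_color_sequence; infer_instance

-- ===== CLAIM (what is proved, stated in full; the proofs are below) =====
def Claim_equal_generate_color_sequence : Prop := ∀ (n_colors : Int), Dom_generate_color_sequence n_colors → Spec_generate_color_sequence n_colors (generate_color_sequence n_colors)

-- ===== LEMMAS AND PROOFS =====

-- element k of the r-fold replicated palette is the palette at k % 10
lemma flatten_replicate_getD (r k : Nat) (hk : k < 10 * r) :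
    ((List.replicate r pvBaseColors).flatten).getD k "" = pvBaseColors.getD (k % 10) "" := by
  induction r generalizing k with
  | zero => omega
  | succ r ih =>
    have : (List.replicate (r + 1) pvBaseColors).flatten
        = pvBaseColors ++ (List.replicate r pvBaseColors).flatten := by
      simp [List.replicate_succ]
    rw [this]
    by_cases h10 : k < 10
    · rw [List.getD_append _ _ _ _ (by simp [pvBaseColors]; omega), Nat.mod_eq_of_lt h10]
    · have hlen : pvBaseColors.length ≤ k := by simp [pvBaseColors]; omega
      rw [List.getD_append_right _ _ _ _ hlen]
      have : pvBaseColors.length = 10 := by simp [pvBaseColors]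
      rw [this, ih (k - 10) (by omega), ← Nat.mod_eq_sub_mod (by omega : 10 ≤ k)]

lemma flatten_replicate_length (r : Nat) :
    ((List.replicate r pvBaseColors).flatten).length = 10 * r := by
  simp [pvBaseColors, Nat.mul_comm]

lemma main_nat (m : Nat) :
    (List.range m).map (fun k => pvBaseColors.getD (k % 10) "")
      = ((List.replicate (m / 10 + 1) pvBaseColors).flatten).take m := by
  have hlt : m < 10 * (m / 10 + 1) := by omega
  apply List.ext_getElem
  · rw [List.length_map, List.length_range, List.length_take, flatten_replicate_length]; omega
  · intro k h1 h2
    have hk : k < m := by simpa using h1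
    rw [List.getElem_take, List.getElem_map, List.getElem_range]
    have hkr : k < ((List.replicate (m / 10 + 1) pvBaseColors).flatten).length := by
      rw [flatten_replicate_length]; omega
    rw [← List.getD_eq_getElem _ "" hkr,
        flatten_replicate_getD _ k (by omega),
        List.getD_eq_getElem _ "" (by simp [pvBaseColors]; omega)]

-- ===== VERDICT (by name: the statement is the Claim_ definition above) =====
theorem generate_color_sequence_spec : Claim_equal_generate_color_sequence := by
  intro n _
  unfold Spec_generate_color_sequence generate_color_sequence generate_color_sequence_alt
  by_cases hn : n ≤ 0
  · simp [hn, PySem.List.pyRange_one_eq_nil hn]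
  · replace hn : 0 < n := by omega
    simp only [if_neg (by omega : ¬ n ≤ 0)]
    obtain ⟨m, rfl⟩ : ∃ m : Nat, n = (m : Int) := ⟨n.toNat, by omega⟩
    rw [PySem.List.foldl_append_singleton_eq_map, PySem.List.pyRange_one,
        PySem.List.slice_to_natCast]
    have hdiv : (PySem.Int.floordiv (m : Int) 10 + 1).toNat = m / 10 + 1 := by
      rw [show ((10 : Int)) = ((10 : Nat) : Int) by norm_num,
          PySem.Int.floordiv_natCast]
      omega
    rw [hdiv, ← main_nat]
    simp only [Int.sub_zero, Int.toNat_natCast, List.map_map]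
    apply List.map_congr_left
    intro k _
    simp only [Function.comp, Int.zero_add]
    rw [show ((10 : Int)) = ((10 : Nat) : Int) by norm_num, PySem.Int.mod_natCast,
        PySem.List.pyGetD_natCast]
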